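-- pv_equiv track=rewrite | github.com/middlefitting/Algorithm-DataStructure | Solved/알고리즘/구현/쉽게푸는문제.py | between_sum
-- ===== SOURCE A (Python) =====
-- def between_sum(s, e):
--     arr = []
--     temp = 1
--     result = 0
--     while True:
--         for i in range(temp):
--             arr.append(temp)
--         temp += 1
--         if len(arr) >= e:
--             break
--     for i in range(s - 1, e):
--         result += arr[i]
--     return result
-- ===== SOURCE B (Python) =====
-- def _prefix(n):
--     # sum of the first n terms of 1,2,2,3,3,3,... via whole-block arithmetic
--     if n <= 0:
--         return 0
--     total, t, rem = 0, 1, n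
--     while rem > t:
--         total += t * t
--         rem -= t
--         t += 1
--     return total + rem * t
--
-- def between_sum(s, e):
--     if s > e:
--         return 0
--     return _prefix(e) - _prefix(s - 1)
-- ===== Notes on version B (the rewrite author's own statement) =====
-- stated objective: faster
-- what changed: Instead of materializing the list 1,2,2,3,3,3,... up to e and summing its slice element by element, B computes the range sum as a difference of two prefix sums, each obtained by whole-block arithmetic (adding t*t per complete block), O(sqrt(e)) instead of O(e).
-- intended difference: For s <= 0 with s - 1 < e and the start index still within the built list, A's negative start index s-1 wraps around the list and adds elements from its tail (A(0,2)=5); B returns the sum of the sequence terms from max(s,1) to e (B(0,2)=3), the intended value for a 1-indexed range sum. — e.g. on between_sum(0, 2): A returns 5, B returns 3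
import Mathlib
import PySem

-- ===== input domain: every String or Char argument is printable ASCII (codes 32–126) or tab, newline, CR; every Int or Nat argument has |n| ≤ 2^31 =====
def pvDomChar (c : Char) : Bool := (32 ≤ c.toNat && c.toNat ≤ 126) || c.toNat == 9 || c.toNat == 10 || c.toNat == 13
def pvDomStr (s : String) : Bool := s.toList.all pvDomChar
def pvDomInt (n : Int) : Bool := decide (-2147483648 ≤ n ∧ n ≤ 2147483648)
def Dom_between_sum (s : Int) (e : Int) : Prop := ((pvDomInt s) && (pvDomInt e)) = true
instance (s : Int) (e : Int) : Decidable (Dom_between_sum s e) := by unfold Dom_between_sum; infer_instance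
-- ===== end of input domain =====

-- B replaces A's list materialisation with block prefix-sum arithmetic
-- (difference of two prefix sums, one t*t term per complete block).

-- ===== PORT A =====
-- the 'while True' builder loop; arr is an Array (like a Python list: O(1) append);
-- fuel is only a totality guard (each pass appends temp ≥ 1 elements, so e.toNat + 1
-- passes always suffice)
def pvBuild (arr : Array Int) (temp : Int) (e : Int) : Nat → Array Int
  | 0 => arr
  | fuel + 1 =>
    let arr' := (PySem.List.pyRange 0 temp 1).foldl (fun a _ => a.push temp) arr
    if e ≤ (arr'.size : Int) then arr' else pvBuild arr' (temp + 1) e fuel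

-- arr[i] with Python's negative-index rule, exact for -size ≤ i < size (out-of-range
-- is IndexError in Python: Pre_ excludes it, the default value is never claimed)
def pvGet (arr : Array Int) (i : Int) : Int :=
  if 0 ≤ i then arr.getD i.toNat 0 else arr.getD (arr.size + i).toNat 0

def between_sum (s : Int) (e : Int) : Int :=
  let arr := pvBuild #[] 1 e (e.toNat + 1)
  (PySem.List.pyRange (s - 1) e 1).foldl (fun r i => r + pvGet arr i) 0

-- ===== PORT B =====
-- Source B's while-loop of _prefix; fuel is only a totality guard (rem shrinks by t ≥ 1)
def pvPrefixLoop (total t rem : Int) : Nat → Int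
  | 0 => total + rem * t
  | fuel + 1 =>
    if t < rem then pvPrefixLoop (total + t * t) (t + 1) (rem - t) fuel
    else total + rem * t

def pvPrefix (n : Int) : Int := if n ≤ 0 then 0 else pvPrefixLoop 0 1 n n.toNat

def between_sum_alt (s : Int) (e : Int) : Int :=
  if e < s then 0 else pvPrefix e - pvPrefix (s - 1)

-- ===== PRECONDITION & SPEC =====
-- pvTri t = t*(t+1)/2; pvLen e = length of the list A builds: the smallest
-- triangular number ≥ max(e,1), computed in closed form via Nat.sqrt
def pvTri (t : Nat) : Nat := t * (t + 1) / 2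
-- floor square root, digit by digit over the 64 base-4 digits of n
-- (kernel-computable arithmetic; exact for n < 4^64, far beyond the
-- 8*max(e,1)+1 ≤ 2^35 reachable inside Dom)
def pvSqrtGo : Nat → Nat → Nat
  | 0, _ => 0
  | d + 1, n =>
    if n = 0 then 0 else
      let r := 2 * pvSqrtGo d (n / 4)
      if (r + 1) * (r + 1) ≤ n then r + 1 else r
def pvSqrt (n : Nat) : Nat := pvSqrtGo 64 n
def pvLen (e : Int) : Nat :=
  let m := (max e 1).toNat
  let t0 := (pvSqrt (8 * m + 1) - 1) / 2
  pvTri (if m ≤ pvTri t0 then t0 else t0 + 1)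

-- Pre_ excludes exactly the inputs where A raises IndexError: a nonempty summation
-- range (s - 1 < e) whose start index s - 1 lies below -len(arr), where len(arr) is
-- pvLen e, the smallest triangular number ≥ max(e,1); every other input is admitted.
def Pre_between_sum (s : Int) (e : Int) : Prop :=
  e ≤ s - 1 ∨ 1 - s ≤ (pvLen e : Int)
instance (s : Int) (e : Int) : Decidable (Pre_between_sum s e) := by
  unfold Pre_between_sum; infer_instance

def pvWitness_between_sum : Int × Int := (1, 5)

-- For s ≤ 0 with s - 1 < e (start index within the built list), A's negative start
-- index wraps around the list and adds elements from its tail (A(0,2) = 5); B returns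
-- the sum of the sequence terms from max(s,1) to e (B(0,2) = 3), the intended value
-- for a 1-indexed range sum.
def D_between_sum (s : Int) (e : Int) : Prop := s ≤ 0 ∧ s - 1 < e
instance (s : Int) (e : Int) : Decidable (D_between_sum s e) := by
  unfold D_between_sum; infer_instance

def Spec_between_sum (s : Int) (e : Int) (out : Int) : Prop :=
  ¬ D_between_sum s e → out = between_sum_alt s e
instance (s : Int) (e : Int) (out : Int) : Decidable (Spec_between_sum s e out) := by
  unfold Spec_between_sum; infer_instance

def pvDiffWitness_between_sum : Int × Int := (0, 2)
def pvDiffWitnessOut_between_sum : Int × Int := (5, 3)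

-- ===== CLAIM (what is proved, stated in full; the proofs are below) =====
def Claim_unchanged_between_sum : Prop := ∀ (s : Int) (e : Int), Dom_between_sum s e →
  Pre_between_sum s e → Spec_between_sum s e (between_sum s e)
def Claim_changed_between_sum : Prop :=
  Dom_between_sum (pvDiffWitness_between_sum.1) (pvDiffWitness_between_sum.2) ∧
  Pre_between_sum (pvDiffWitness_between_sum.1) (pvDiffWitness_between_sum.2) ∧
  D_between_sum (pvDiffWitness_between_sum.1) (pvDiffWitness_between_sum.2) ∧
  between_sum (pvDiffWitness_between_sum.1) (pvDiffWitness_between_sum.2) = pvDiffWitnessOut_between_sum.1 ∧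
  between_sum_alt (pvDiffWitness_between_sum.1) (pvDiffWitness_between_sum.2) = pvDiffWitnessOut_between_sum.2 ∧
  pvDiffWitnessOut_between_sum.1 ≠ pvDiffWitnessOut_between_sum.2
def Claim_exact_between_sum : Prop := ∀ (s : Int) (e : Int), Dom_between_sum s e →
  Pre_between_sum s e → D_between_sum s e → between_sum s e ≠ between_sum_alt s e
-- ===== LEMMAS AND PROOFS =====

-- value of the sequence 1,2,2,3,3,3,… at 0-based index i, shifted so that the next
-- block has value t+1 (the whole sequence is pvVal i 0)
def pvVal (i t : Nat) : Int :=
  if i ≤ t then (t : Int) + 1 else pvVal (i - (t + 1)) (t + 1)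
termination_by i
decreasing_by omega

-- d consecutive blocks starting with the block of value t+1
def pvBlocks (t : Nat) : Nat → List Int
  | 0 => []
  | d + 1 => List.replicate (t + 1) ((t : Int) + 1) ++ pvBlocks (t + 1) d

-- sum of the first n terms of the sequence
def pvG (n : Nat) : Int := ∑ i ∈ Finset.range n, pvVal i 0

theorem pvVal_of_le (i t : Nat) (h : i ≤ t) : pvVal i t = (t : Int) + 1 := by
  rw [pvVal, if_pos h]

theorem pvVal_of_gt (i t : Nat) (h : t < i) : pvVal i t = pvVal (i - (t + 1)) (t + 1) := by
  rw [pvVal, if_neg (by omega)]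

theorem pvBlocks_succ (d : Nat) : ∀ t : Nat,
    pvBlocks t (d + 1) = pvBlocks t d ++ List.replicate (t + d + 1) (((t + d : Nat) : Int) + 1) := by
  induction d with
  | zero => intro t; simp [pvBlocks]
  | succ d ih =>
    intro t
    show List.replicate (t + 1) ((t : Int) + 1) ++ pvBlocks (t + 1) (d + 1)
        = List.replicate (t + 1) ((t : Int) + 1) ++ pvBlocks (t + 1) d ++ _
    rw [ih (t + 1), ← List.append_assoc]
    have h1 : t + 1 + d + 1 = t + (d + 1) + 1 := by omega
    have h2 : ((t + 1 + d : Nat) : Int) + 1 = ((t + (d + 1) : Nat) : Int) + 1 := by push_cast; ring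
    rw [h1, h2]

theorem pvBlocks_get (d : Nat) : ∀ (t i : Nat) (h : i < (pvBlocks t d).length),
    (pvBlocks t d)[i] = pvVal i t := by
  induction d with
  | zero => intro t i h; simp [pvBlocks] at h
  | succ d ih =>
    intro t i h
    show (List.replicate (t + 1) ((t : Int) + 1) ++ pvBlocks (t + 1) d)[i] = _
    by_cases hi : i < t + 1
    · rw [List.getElem_append_left (by simpa using hi)]
      rw [List.getElem_replicate, pvVal_of_le i t (by omega)]
    · rw [List.getElem_append_right (by simpa using hi)]
      simp only [List.length_replicate]
      rw [ih (t + 1) (i - (t + 1)) (by simp [pvBlocks] at h ⊢; omega)]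
      rw [pvVal_of_gt i t (by omega)]

-- the inner 'for i in range(temp): arr.append(temp)' loop
theorem pvAppend_loop (l : List Int) (a : Array Int) (v : Int) :
    (l.foldl (fun acc _ => acc.push v) a).toList = a.toList ++ List.replicate l.length v := by
  induction l generalizing a with
  | nil => simp
  | cons x xs ih =>
    rw [List.foldl_cons, ih, Array.toList_push, List.append_assoc, List.length_cons]
    congr 1

-- one builder pass turns pvBlocks 0 T into pvBlocks 0 (T+1)
theorem pvBuild_step (T : Nat) :
    ((PySem.List.pyRange 0 ((T : Int) + 1) 1).foldl (fun a _ => a.push ((T : Int) + 1))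
        (pvBlocks 0 T).toArray)
      = (pvBlocks 0 (T + 1)).toArray := by
  apply Array.ext'
  rw [pvAppend_loop, PySem.List.length_pyRange_one, List.toList_toArray, List.toList_toArray,
      pvBlocks_succ]
  have h1 : (((T : Int) + 1) - 0).toNat = 0 + T + 1 := by omega
  have h2 : ((0 + T : Nat) : Int) + 1 = (T : Int) + 1 := by omega
  rw [h1, h2]

theorem pvGet_nonneg (arr : Array Int) (i : Int) (h0 : 0 ≤ i)
    (h1 : i.toNat < arr.toList.length) : pvGet arr i = arr.toList[i.toNat] := by
  unfold pvGet
  rw [if_pos h0]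
  unfold Array.getD
  rw [dif_pos (by simpa using h1)]
  rfl

theorem pvBuild_eq (fuel : Nat) : ∀ (T : Nat) (e : Int),
    e.toNat ≤ (pvBlocks 0 T).length + fuel →
    ∃ T', pvBuild (pvBlocks 0 T).toArray ((T : Int) + 1) e fuel = (pvBlocks 0 T').toArray ∧
          e ≤ ((pvBlocks 0 T').length : Int) ∧ T ≤ T' := by
  induction fuel with
  | zero =>
    intro T e h
    exact ⟨T, rfl, by omega, le_rfl⟩
  | succ fuel ih =>
    intro T e h
    rw [pvBuild]
    simp only [pvBuild_step, List.size_toArray]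
    by_cases hc : e ≤ ((pvBlocks 0 (T + 1)).length : Int)
    · exact ⟨T + 1, by rw [if_pos hc], hc, by omega⟩
    · rw [if_neg hc]
      have hlen : (pvBlocks 0 (T + 1)).length = (pvBlocks 0 T).length + (T + 1) := by
        rw [pvBlocks_succ]; simp
      have hcast : ((T : Int) + 1) + 1 = ((T + 1 : Nat) : Int) + 1 := by push_cast; ring
      rw [hcast]
      obtain ⟨T', h1, h2, h3⟩ := ih (T + 1) e (by omega)
      exact ⟨T', h1, h2, by omega⟩

-- the final built array: some pvBlocks 0 T', T' ≥ 1, long enough for e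
theorem pvBuild_final (e : Int) :
    ∃ T', pvBuild #[] 1 e (e.toNat + 1) = (pvBlocks 0 T').toArray ∧
          e ≤ ((pvBlocks 0 T').length : Int) ∧ 1 ≤ T' := by
  rw [pvBuild]
  have hstep : ((PySem.List.pyRange 0 (1 : Int) 1).foldl (fun a _ => a.push (1 : Int)) #[])
      = (pvBlocks 0 1).toArray := by
    have h := pvBuild_step 0
    simp only [pvBlocks, List.append_nil] at h
    exact h
  simp only [hstep, List.size_toArray]
  by_cases hc : e ≤ ((pvBlocks 0 1).length : Int)
  · rw [if_pos hc]
    exact ⟨1, rfl, hc, le_rfl⟩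
  · rw [if_neg hc]
    have hlen1 : (pvBlocks 0 1).length = 1 := by simp [pvBlocks]
    have hcast : ((1 : Int) + 1) = ((1 : Nat) : Int) + 1 := by norm_num
    rw [hcast]
    obtain ⟨T', h1, h2, h3⟩ := pvBuild_eq e.toNat 1 e (by omega)
    exact ⟨T', h1, h2, h3⟩

-- A's summation loop over a list that agrees with pvVal, summed from a to a+n
theorem pvSum_loop (n : Nat) : ∀ (a : Int) (arr : Array Int),
    0 ≤ a → (∀ i : Nat, (h : i < arr.toList.length) → arr.toList[i] = pvVal i 0) →
    a + n ≤ (arr.toList.length : Int) →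
    (PySem.List.pyRange a (a + n) 1).foldl (fun r i => r + pvGet arr i) 0
      = pvG (a + n).toNat - pvG a.toNat := by
  induction n with
  | zero =>
    intro a arr ha _ _
    rw [show a + ((0 : Nat) : Int) = a by simp, PySem.List.pyRange_one_eq_nil le_rfl]
    simp
  | succ n ih =>
    intro a arr ha hidx hlen
    push_cast at hlen ⊢
    rw [show a + ((n : Int) + 1) = (a + n) + 1 by ring,
        PySem.List.pyRange_one_succ_right (by omega : a ≤ a + (n : Int)), List.foldl_append]
    rw [ih a arr ha hidx (by omega)]
    simp only [List.foldl_cons, List.foldl_nil]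
    have hlt : (a + n).toNat < arr.toList.length := by omega
    rw [pvGet_nonneg arr (a + n) (by omega) hlt]
    rw [hidx _ hlt]
    have h3 : ((a + n) + 1).toNat = (a + n).toNat + 1 := by omega
    rw [h3]
    unfold pvG
    rw [Finset.sum_range_succ]
    ring

-- B's _prefix loop computes the remaining block sums
theorem pvPrefixLoop_eq (fuel : Nat) : ∀ (t rem total : Int),
    1 ≤ t → 1 ≤ rem → rem.toNat ≤ fuel →
    pvPrefixLoop total t rem fuel
      = total + ∑ i ∈ Finset.range rem.toNat, pvVal i (t.toNat - 1) := by
  induction fuel with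
  | zero => intro t rem total _ h2 h3; omega
  | succ fuel ih =>
    intro t rem total ht hrem hfuel
    rw [pvPrefixLoop]
    by_cases hc : t < rem
    · rw [if_pos hc]
      rw [ih (t + 1) (rem - t) (total + t * t) (by omega) (by omega) (by omega)]
      have key : ∑ i ∈ Finset.range rem.toNat, pvVal i (t.toNat - 1)
          = t * t + ∑ i ∈ Finset.range (rem - t).toNat, pvVal i ((t + 1).toNat - 1) := by
        have hsplit : rem.toNat = t.toNat + (rem - t).toNat := by omega
        rw [hsplit, Finset.sum_range_add]
        congr 1
        · have hv : ∀ i ∈ Finset.range t.toNat, pvVal i (t.toNat - 1) = t := by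
            intro i hi
            simp only [Finset.mem_range] at hi
            rw [pvVal_of_le i (t.toNat - 1) (by omega)]
            omega
          rw [Finset.sum_congr rfl hv, Finset.sum_const, Finset.card_range, nsmul_eq_mul]
          have hcast : ((t.toNat : Nat) : Int) = t := by omega
          rw [hcast]
        · apply Finset.sum_congr rfl
          intro i _
          rw [pvVal_of_gt (t.toNat + i) (t.toNat - 1) (by omega)]
          congr 1 <;> omega
      rw [key]; ring
    · rw [if_neg hc]
      have hv : ∀ i ∈ Finset.range rem.toNat, pvVal i (t.toNat - 1) = t := by
        intro i hi
        simp only [Finset.mem_range] at hi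
        rw [pvVal_of_le i (t.toNat - 1) (by omega)]
        omega
      rw [Finset.sum_congr rfl hv, Finset.sum_const, Finset.card_range, nsmul_eq_mul]
      have hcast : ((rem.toNat : Nat) : Int) = rem := by omega
      rw [hcast]

theorem pvPrefix_eq (n : Int) (hn : 0 ≤ n) : pvPrefix n = pvG n.toNat := by
  unfold pvPrefix
  by_cases h : n ≤ 0
  · rw [if_pos h]
    have h0 : n.toNat = 0 := by omega
    simp [h0, pvG]
  · rw [if_neg h]
    rw [pvPrefixLoop_eq n.toNat 1 n 0 (by omega) (by omega) (le_refl _)]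
    simp [pvG]

-- ===== tightness: inside D_ (and Pre_), A's wraparound adds ≥ 1 positive tail terms =====

theorem pvSqrtGo_bounds (d : Nat) : ∀ n : Nat, n < 4 ^ d →
    pvSqrtGo d n * pvSqrtGo d n ≤ n ∧ n < (pvSqrtGo d n + 1) * (pvSqrtGo d n + 1) := by
  induction d with
  | zero => intro n h; simp [pvSqrtGo]; omega
  | succ d ih =>
    intro n h
    rw [pvSqrtGo]
    by_cases h0 : n = 0
    · simp [h0]
    · rw [if_neg h0]
      have hdiv : n / 4 < 4 ^ d := by
        rw [Nat.div_lt_iff_lt_mul (by norm_num)]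
        calc n < 4 ^ (d + 1) := h
          _ = 4 ^ d * 4 := by rw [pow_succ]
      obtain ⟨ih1, ih2⟩ := ih (n / 4) hdiv
      set r0 := pvSqrtGo d (n / 4) with hr0
      have hq1 : 4 * (n / 4) ≤ n := by omega
      have hq2 : n < 4 * (n / 4) + 4 := by omega
      have hlow : (2 * r0) * (2 * r0) ≤ n := by nlinarith
      have hhigh : n < (2 * r0 + 2) * (2 * r0 + 2) := by nlinarith
      by_cases hc : (2 * r0 + 1) * (2 * r0 + 1) ≤ n
      · rw [if_pos hc]; exact ⟨hc, by nlinarith⟩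
      · rw [if_neg hc]; exact ⟨hlow, by omega⟩

theorem pvTri_mono (u v : Nat) (h : u ≤ v) : pvTri u ≤ pvTri v := by
  unfold pvTri
  exact Nat.div_le_div_right (Nat.mul_le_mul h (by omega))

theorem pvTri_pred_lt (t m : Nat) (h : (t - 1) * t < 2 * m) : pvTri (t - 1) < m := by
  cases t with
  | zero => simp [pvTri] at h ⊢; omega
  | succ k => unfold pvTri; simp only [Nat.add_sub_cancel] at h ⊢; omega

-- the closed-form pvLen is at most any triangular number tri T' ≥ max(e,1)
theorem pvLen_le_tri (e : Int) (T' : Nat) (hbound : (max e 1).toNat ≤ 2 ^ 31 + 1)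
    (hm : (max e 1).toNat ≤ pvTri T') : pvLen e ≤ pvTri T' := by
  simp only [pvLen, pvSqrt]
  set m := (max e 1).toNat with hmdef
  have hm1 : 1 ≤ m := by
    rw [hmdef]; omega
  have hsq := pvSqrtGo_bounds 64 (8 * m + 1) (by
    calc 8 * m + 1 ≤ 8 * (2 ^ 31 + 1) + 1 := by omega
      _ < 4 ^ 64 := by norm_num)
  set k := pvSqrtGo 64 (8 * m + 1) with hkdef
  obtain ⟨hk1, hk2⟩ := hsq
  have hk3 : 3 ≤ k := by nlinarith
  set t0 := (k - 1) / 2 with ht0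
  have ht01 : 1 ≤ t0 := by omega
  have h2t0 : 2 * t0 + 1 ≤ k := by omega
  have htsum : t0 * (t0 + 1) ≤ 2 * m := by nlinarith
  -- the chosen index is ≤ T' because tri (index - 1) < m ≤ tri T'
  have hkey : ∀ Tp : Nat, pvTri (Tp - 1) < m → pvTri Tp ≤ pvTri T' := by
    intro Tp hlt
    apply pvTri_mono
    by_contra hgt
    have : pvTri T' ≤ pvTri (Tp - 1) := pvTri_mono _ _ (by omega)
    omega
  by_cases hc : m ≤ pvTri t0
  · rw [if_pos hc]
    refine hkey t0 (pvTri_pred_lt t0 m ?_)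
    obtain ⟨u, hu⟩ : ∃ u, t0 = u + 1 := ⟨t0 - 1, by omega⟩
    rw [hu] at htsum ⊢
    have hstep : u * (u + 1) < (u + 1) * (u + 1 + 1) := by nlinarith
    simpa using lt_of_lt_of_le hstep htsum
  · rw [if_neg hc]
    refine hkey (t0 + 1) ?_
    have hlt : pvTri t0 < m := by omega
    simpa using hlt
  
theorem pvBlocks_length (d : Nat) : (pvBlocks 0 d).length = pvTri d := by
  induction d with
  | zero => simp [pvBlocks, pvTri]
  | succ d ih =>
    rw [pvBlocks_succ, List.length_append, List.length_replicate, ih]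
    unfold pvTri
    obtain ⟨c, hc⟩ := Nat.even_mul_succ_self d
    have h2 : (d + 1) * (d + 1 + 1) = d * (d + 1) + 2 * (d + 1) := by ring
    omega

theorem pvBlocks_ge_one (d : Nat) : ∀ (t : Nat), ∀ x ∈ pvBlocks t d, 1 ≤ x := by
  induction d with
  | zero => intro t x hx; simp [pvBlocks] at hx
  | succ d ih =>
    intro t x hx
    rw [show pvBlocks t (d + 1)
        = List.replicate (t + 1) ((t : Int) + 1) ++ pvBlocks (t + 1) d from rfl] at hx
    rcases List.mem_append.mp hx with h | h
    · have := List.eq_of_mem_replicate h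
      omega
    · exact ih (t + 1) x h

theorem pvFoldl_shift (l : List Int) (g : Int → Int) (c : Int) :
    l.foldl (fun r i => r + g i) c = c + l.foldl (fun r i => r + g i) 0 := by
  induction l generalizing c with
  | nil => simp
  | cons x xs ih =>
    simp only [List.foldl_cons]
    rw [ih (c + g x), ih (0 + g x)]
    ring

theorem pvFoldl_ge_length (l : List Int) (g : Int → Int) (h : ∀ i ∈ l, 1 ≤ g i) :
    (l.length : Int) ≤ l.foldl (fun r i => r + g i) 0 := by
  induction l with
  | nil => simp
  | cons x xs ih =>
    simp only [List.foldl_cons, List.length_cons]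
    rw [pvFoldl_shift]
    have h1 := h x (by simp)
    have h2 := ih (fun i hi => h i (by simp [hi]))
    push_cast
    omega

-- arr[i] for a negative in-range index, as the wrapped list element
theorem pvGet_neg (arr : Array Int) (i : Int) (hneg : i < 0)
    (h : ((arr.size : Int) + i).toNat < arr.toList.length) :
    pvGet arr i = arr.toList[((arr.size : Int) + i).toNat] := by
  unfold pvGet
  rw [if_neg (by omega)]
  unfold Array.getD
  rw [dif_pos (by simpa using h)]
  rfl

-- a wrapped (negative-index) access into the built list is ≥ 1
theorem pvGet_neg_ge_one (T' : Nat) (i : Int) (hneg : i < 0)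
    (hin : -(((pvBlocks 0 T').length : Int)) ≤ i) :
    1 ≤ pvGet (pvBlocks 0 T').toArray i := by
  have hsz : (((pvBlocks 0 T').toArray.size : Int)) = ((pvBlocks 0 T').length : Int) := by simp
  have hidx : ((((pvBlocks 0 T').toArray.size : Int)) + i).toNat
      < (pvBlocks 0 T').toArray.toList.length := by simp; omega
  rw [pvGet_neg _ _ hneg hidx]
  refine pvBlocks_ge_one T' 0 _ ?_
  exact List.getElem_mem hidx

-- ===== VERDICT (by name: the statement is the Claim_ definition above) =====
theorem between_sum_spec : Claim_unchanged_between_sum := by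
  intro s e _ _ hD
  unfold D_between_sum at hD
  show between_sum s e = between_sum_alt s e
  by_cases hse : e ≤ s - 1
  · unfold between_sum between_sum_alt
    rw [PySem.List.pyRange_one_eq_nil hse, if_pos (by omega)]
    rfl
  · have hs1 : 1 ≤ s := by
      rcases not_and_or.mp hD with h | h <;> omega
    obtain ⟨T', hbuild, hlenT, -⟩ := pvBuild_final e
    show (PySem.List.pyRange (s - 1) e 1).foldl
        (fun r i => r + pvGet (pvBuild #[] 1 e (e.toNat + 1)) i) 0 = between_sum_alt s e
    rw [hbuild]
    have hsum := pvSum_loop (e - (s - 1)).toNat (s - 1) (pvBlocks 0 T').toArray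
      (by omega)
      (fun i h => pvBlocks_get T' 0 i h)
      (by rw [List.toList_toArray]; omega)
    rw [show (s - 1) + (((e - (s - 1)).toNat : Nat) : Int) = e by omega] at hsum
    rw [hsum]
    unfold between_sum_alt
    rw [if_neg (by omega)]
    rw [pvPrefix_eq e (by omega), pvPrefix_eq (s - 1) (by omega)]

theorem between_sum_changed : Claim_changed_between_sum := by
  unfold Claim_changed_between_sum; decide

theorem between_sum_tight : Claim_exact_between_sum := by
  intro s e hdom hpre hD
  obtain ⟨hs0, hse⟩ := hD
  have hdome : e ≤ 2147483648 := by
    unfold Dom_between_sum at hdom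
    simp only [pvDomInt, Bool.and_eq_true, decide_eq_true_eq] at hdom
    exact hdom.2.2
  obtain ⟨T', hbuild, hlenT, hT1⟩ := pvBuild_final e
  have hlenEq : (pvBlocks 0 T').length = pvTri T' := pvBlocks_length T'
  have htri1 : 1 ≤ pvTri T' := le_trans (by norm_num [pvTri]) (pvTri_mono 1 T' hT1)
  have hmle : (max e 1).toNat ≤ pvTri T' := by omega
  have hple : pvLen e ≤ pvTri T' := pvLen_le_tri e T' (by omega) hmle
  have hpre2 : 1 - s ≤ (pvLen e : Int) := by
    rcases hpre with h | h
    · omega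
    · exact h
  have hsbound : -(((pvBlocks 0 T').length : Int)) ≤ s - 1 := by
    rw [hlenEq]; omega
  show between_sum s e ≠ between_sum_alt s e
  show (PySem.List.pyRange (s - 1) e 1).foldl
      (fun r i => r + pvGet (pvBuild #[] 1 e (e.toNat + 1)) i) 0 ≠ between_sum_alt s e
  rw [hbuild]
  by_cases he : e ≤ 0
  · -- the whole summation range consists of wrapped negative indices, each term ≥ 1
    have hA : ((PySem.List.pyRange (s - 1) e 1).length : Int)
        ≤ (PySem.List.pyRange (s - 1) e 1).foldl
            (fun r i => r + pvGet (pvBlocks 0 T').toArray i) 0 := by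
      refine pvFoldl_ge_length _ _ ?_
      intro i hi
      rw [PySem.List.mem_pyRange_one] at hi
      exact pvGet_neg_ge_one T' i (by omega) (by omega)
    rw [PySem.List.length_pyRange_one] at hA
    have hB : between_sum_alt s e = 0 := by
      unfold between_sum_alt
      split_ifs with h
      · rfl
      · rw [pvPrefix, if_pos he, pvPrefix, if_pos (by omega : s - 1 ≤ 0)]
        ring
    omega
  · -- split the range at 0: a positive wrapped tail sum plus exactly B's value
    rw [PySem.List.pyRange_one_append (s - 1) 0 e (by omega) (by omega), List.foldl_append]
    set Sneg := (PySem.List.pyRange (s - 1) 0 1).foldl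
        (fun r i => r + pvGet (pvBlocks 0 T').toArray i) 0 with hSneg
    rw [pvFoldl_shift]
    have hneg1 : 1 ≤ Sneg := by
      have hlb : ((PySem.List.pyRange (s - 1) 0 1).length : Int) ≤ Sneg := by
        rw [hSneg]
        refine pvFoldl_ge_length _ _ ?_
        intro i hi
        rw [PySem.List.mem_pyRange_one] at hi
        exact pvGet_neg_ge_one T' i (by omega) (by omega)
      rw [PySem.List.length_pyRange_one] at hlb
      omega
    have hpos := pvSum_loop e.toNat 0 (pvBlocks 0 T').toArray (le_refl 0)
      (fun i h => pvBlocks_get T' 0 i h)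
      (by rw [List.toList_toArray]; omega)
    rw [show (0 : Int) + ((e.toNat : Nat) : Int) = e by omega] at hpos
    rw [hpos]
    unfold between_sum_alt
    rw [if_neg (by omega)]
    rw [pvPrefix_eq e (by omega), show pvPrefix (s - 1) = 0 by
      rw [pvPrefix, if_pos (by omega : s - 1 ≤ 0)]]
    have hG0 : pvG (0 : Int).toNat = 0 := by simp [pvG]
    rw [hG0]
    omega
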